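-- pv_equiv track=rewrite | github.com/mza7a/cryptopals | set01/s01c03.py | xor_data
-- ===== SOURCE A (Python) =====
-- def xor_data(xor1, xor2):
--     set_bin1 = []
--     set_bin2 = []
--     for byte1 in xor1:
--         set_bin1.append("{:0>8}".format(bin(byte1)[2:]))
--     for byte2 in xor2:
--         set_bin2.append("{:0>8}".format(bin(byte2)[2:]))
--
--     result = ""
--
--     for byte1, byte2 in zip(set_bin1, set_bin2):
--         result += str("{:0>2}".format(hex(int("".join(["0" if (byte1[i] == byte2[i]) else "1" for i in range(8)]), 2))[2:]))
--
--     return(result)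
-- ===== SOURCE B (Python) =====
-- def xor_data(xor1, xor2):
--     n = min(len(xor1), len(xor2))
--     if n == 0:
--         return ''
--     x = int.from_bytes(bytes(xor1[:n]), 'big') ^ int.from_bytes(bytes(xor2[:n]), 'big')
--     return format(x, '0{}x'.format(2 * n))
-- ===== Notes on version B (the rewrite author's own statement) =====
-- stated objective: simpler
-- what changed: Replaces A's per-byte binary-string construction, per-bit string comparison and per-pair hex formatting by one big-integer XOR of the two byte sequences (int.from_bytes) rendered as a single zero-padded hex numeral.
-- outside the precondition, e.g. on xor_data([300], [5]): A returns '93', B raises ValueError; on xor_data([-5], [3]): A returns '0e', B raises ValueError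
import Mathlib
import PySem

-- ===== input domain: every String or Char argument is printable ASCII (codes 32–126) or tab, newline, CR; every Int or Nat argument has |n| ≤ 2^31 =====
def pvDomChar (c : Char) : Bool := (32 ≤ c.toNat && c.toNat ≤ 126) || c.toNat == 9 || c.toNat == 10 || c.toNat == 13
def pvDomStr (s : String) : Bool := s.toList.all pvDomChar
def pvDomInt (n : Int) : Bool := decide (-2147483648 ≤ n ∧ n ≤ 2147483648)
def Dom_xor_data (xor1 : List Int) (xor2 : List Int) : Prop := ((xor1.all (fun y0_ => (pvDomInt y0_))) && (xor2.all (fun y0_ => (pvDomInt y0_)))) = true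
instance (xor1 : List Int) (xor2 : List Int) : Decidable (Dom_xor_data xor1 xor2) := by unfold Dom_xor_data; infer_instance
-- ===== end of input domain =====

-- B replaces A's per-byte binary-string machinery by one big-integer XOR of the two
-- byte sequences rendered as a single zero-padded hex numeral (objective: simpler).
-- Shared numeral helper: character of a base-≤16 digit (lowercase), exact Python digit chars.
def digitChr (d : Nat) : Char := if d < 10 then Char.ofNat (48 + d) else Char.ofNat (87 + d)

-- fixed-width little-endian base-b digit list; its reverse is the zero-padded numeral.
-- (reverse (digitsLE b k x)) is exactly Python's zero-padded base-b rendering of x when x < b^k.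
def digitsLE (b : Nat) : Nat → Nat → List Char
  | 0, _ => []
  | k+1, x => digitChr (x % b) :: digitsLE b k (x / b)

-- ===== PORT A =====
-- "{:0>8}".format(bin(byte)[2:]) — exact for 0 ≤ byte < 256 (guaranteed by Pre_xor_data)
def bin8 (e : Int) : List Char := (digitsLE 2 8 e.toNat).reverse

-- int(s, 2) for a string s of '0'/'1' characters (A's joined string always is one)
def parseBin (s : List Char) : Nat := s.foldl (fun a c => 2 * a + (if c = '1' then 1 else 0)) 0

-- "{:0>2}".format(hex(v)[2:]) — exact for 0 ≤ v < 256 (always true for A's per-pair value)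
def hex2 (v : Nat) : List Char := (digitsLE 16 2 v).reverse

-- (indexing byte strings with getD is exact: both strings always have length ≥ 8)
def xor_data (xor1 : List Int) (xor2 : List Int) : String :=
  let set_bin1 := xor1.map bin8
  let set_bin2 := xor2.map bin8
  let result := (set_bin1.zip set_bin2).foldl
    (fun acc p =>
      acc ++ hex2 (parseBin ((List.range 8).map
        (fun i => if p.1.getD i '?' = p.2.getD i '?' then '0' else '1'))))
    ([] : List Char)
  String.mk result

-- ===== PORT B =====
-- int.from_bytes(bytes(l), 'big') — exact for bytes 0..255 (guaranteed by Pre_xor_data)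
def fromBytesBE (l : List Int) : Nat := l.foldl (fun acc b => acc * 256 + b.toNat) 0

-- format(x, '0{2n}x') rendered via the fixed-width numeral (exact since x < 16^(2n))
def xor_data_alt (xor1 : List Int) (xor2 : List Int) : String :=
  let n := min xor1.length xor2.length
  if n = 0 then ""
  else
    let x := fromBytesBE (xor1.take n) ^^^ fromBytesBE (xor2.take n)
    String.mk ((digitsLE 16 (2 * n) x).reverse)

-- ===== PRECONDITION & SPEC =====
-- Pre_ restricts the consumed prefixes (the first min-length elements of each list) to the
-- function's natural domain, bytes 0..255: on ints outside that range A's binary-string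
-- padding produces meaningless strings (and B's bytes() raises ValueError).
def Pre_xor_data (xor1 : List Int) (xor2 : List Int) : Prop :=
  (∀ e ∈ xor1.take (min xor1.length xor2.length), 0 ≤ e ∧ e < 256) ∧
  (∀ e ∈ xor2.take (min xor1.length xor2.length), 0 ≤ e ∧ e < 256)
instance (xor1 : List Int) (xor2 : List Int) : Decidable (Pre_xor_data xor1 xor2) := by
  unfold Pre_xor_data; infer_instance

def pvWitness_xor_data : List Int × List Int := ([1, 255, 28], [0, 171])

def Spec_xor_data (xor1 : List Int) (xor2 : List Int) (out : String) : Prop := out = xor_data_alt xor1 xor2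
instance (xor1 : List Int) (xor2 : List Int) (out : String) : Decidable (Spec_xor_data xor1 xor2 out) := by unfold Spec_xor_data; infer_instance

-- ===== CLAIM (what is proved, stated in full; the proofs are below) =====
def Claim_equal_xor_data : Prop := ∀ (xor1 : List Int) (xor2 : List Int), Dom_xor_data xor1 xor2 → Pre_xor_data xor1 xor2 → Spec_xor_data xor1 xor2 (xor_data xor1 xor2)

-- ===== LEMMAS AND PROOFS =====

theorem length_digitsLE (b k x : Nat) : (digitsLE b k x).length = k := by
  induction k generalizing x with
  | zero => rfl
  | succ k ih => simp [digitsLE, ih]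

-- turning A's index loop into a zipWith
theorem rangeMap_getD :
    ∀ (n : Nat) (l1 l2 : List Char), l1.length = n → l2.length = n →
    (List.range n).map (fun i => if l1.getD i '?' = l2.getD i '?' then '0' else '1')
      = List.zipWith (fun c d => if c = d then '0' else ('1' : Char)) l1 l2 := by
  intro n
  induction n with
  | zero => intro l1 l2 h1 h2; simp_all [List.length_eq_zero_iff]
  | succ n ih =>
    intro l1 l2 h1 h2
    cases l1 with
    | nil => simp at h1
    | cons c cs =>
      cases l2 with
      | nil => simp at h2
      | cons d ds =>
        simp only [List.range_succ_eq_map, List.map_cons, List.map_map, List.zipWith_cons_cons,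
          Function.comp_def, List.getD_cons_zero, List.getD_cons_succ]
        rw [ih cs ds (by simpa using h1) (by simpa using h2)]

-- the bit-by-bit comparison computes XOR
theorem valLE_xor : ∀ (k x y : Nat), x < 2 ^ k → y < 2 ^ k →
    (List.zipWith (fun c d => if c = d then '0' else '1')
        (digitsLE 2 k x) (digitsLE 2 k y)).foldr
      (fun c a => 2 * a + (if c = '1' then 1 else 0)) 0 = x ^^^ y := by
  intro k
  induction k with
  | zero =>
    intro x y hx hy
    interval_cases x
    interval_cases y
    rfl
  | succ k ih =>
    intro x y hx hy
    have hx2 : x / 2 < 2 ^ k := by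
      have : 2 ^ (k+1) = 2 * 2 ^ k := by ring
      omega
    have hy2 : y / 2 < 2 ^ k := by
      have : 2 ^ (k+1) = 2 * 2 ^ k := by ring
      omega
    simp only [digitsLE, List.zipWith_cons_cons, List.foldr_cons, ih _ _ hx2 hy2]
    have hsplit : x ^^^ y = 2 * (x / 2 ^^^ y / 2) + (x + y) % 2 := by
      have h1 : (x ^^^ y) / 2 = x / 2 ^^^ y / 2 := Nat.xor_div_two
      have h2 : (x ^^^ y) % 2 = (x + y) % 2 := Nat.xor_mod_two_eq
      omega
    rcases Nat.mod_two_eq_zero_or_one x with h | h <;>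
      rcases Nat.mod_two_eq_zero_or_one y with h' | h' <;>
      simp [digitChr, h, h'] <;> omega

-- A's per-pair computation equals the hex of the XOR of the two bytes
theorem pairA (x y : Int) (hx0 : 0 ≤ x) (hx : x < 256) (hy0 : 0 ≤ y) (hy : y < 256) :
    parseBin ((List.range 8).map
      (fun i => if (bin8 x).getD i '?' = (bin8 y).getD i '?' then '0' else '1'))
    = x.toNat ^^^ y.toNat := by
  have lx : (digitsLE 2 8 x.toNat).length = 8 := length_digitsLE _ _ _
  have ly : (digitsLE 2 8 y.toNat).length = 8 := length_digitsLE _ _ _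
  unfold bin8
  rw [rangeMap_getD 8 _ _ (by simpa using lx) (by simpa using ly),
      ← List.reverse_zipWith (by omega)]
  unfold parseBin
  rw [List.foldl_reverse]
  exact valLE_xor 8 x.toNat y.toNat (by omega) (by omega)

-- splitting a fixed-width numeral at a digit boundary
theorem digits_split (j z : Nat) : ∀ (m r : Nat), r < 16 ^ m →
    digitsLE 16 (m + j) (z * 16 ^ m + r) = digitsLE 16 m r ++ digitsLE 16 j z := by
  intro m
  induction m with
  | zero => intro r hr; simp at hr; simp [hr, digitsLE]
  | succ m ih =>
    intro r hr
    have hp : 16 ^ (m + 1) = 16 ^ m * 16 := by ring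
    have h2 : z * 16 ^ (m+1) = (z * 16 ^ m) * 16 := by rw [hp]; ring
    have hmod : (z * 16 ^ (m+1) + r) % 16 = r % 16 := by omega
    have hdiv : (z * 16 ^ (m+1) + r) / 16 = z * 16 ^ m + r / 16 := by omega
    have hr16 : r / 16 < 16 ^ m := by omega
    rw [show m + 1 + j = (m + j) + 1 from by omega]
    simp only [digitsLE, hmod, hdiv, List.cons_append]
    rw [ih _ hr16]

theorem foldBE_shift (l : List Int) : ∀ (a : Nat),
    l.foldl (fun acc b => acc * 256 + b.toNat) a
      = a * 256 ^ l.length + fromBytesBE l := by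
  induction l with
  | nil => intro a; simp [fromBytesBE]
  | cons x l ih =>
    intro a
    show l.foldl _ (a * 256 + x.toNat) = _
    rw [ih]
    unfold fromBytesBE
    show _ = a * 256 ^ (l.length + 1) + l.foldl _ (0 * 256 + x.toNat)
    rw [show (0 * 256 + x.toNat) = x.toNat from by omega, ih x.toNat]
    unfold fromBytesBE
    ring

theorem fromBytesBE_lt (l : List Int) (h : ∀ e ∈ l, e < 256) :
    fromBytesBE l < 256 ^ l.length := by
  induction l with
  | nil => simp [fromBytesBE]
  | cons x l ih =>
    have hx256 : x < 256 := h x (by simp)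
    have hx : x.toNat < 256 := by omega
    have htail : fromBytesBE l < 256 ^ l.length := ih (fun e he => h e (by simp [he]))
    unfold fromBytesBE
    show l.foldl _ (0 * 256 + x.toNat) < _
    rw [show (0 * 256 + x.toNat) = x.toNat from by omega, foldBE_shift]
    show x.toNat * 256 ^ l.length + fromBytesBE l < _
    have : (x.toNat + 1) * 256 ^ l.length ≤ 256 ^ (l.length + 1) := by
      rw [pow_succ, Nat.mul_comm (256 ^ l.length) 256]
      exact Nat.mul_le_mul (by omega) le_rfl
    calc x.toNat * 256 ^ l.length + fromBytesBE l
        < (x.toNat + 1) * 256 ^ l.length := by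
          rw [Nat.add_mul, Nat.one_mul]; omega
      _ ≤ 256 ^ (l.length + 1) := this

-- XOR splits at a 2^k boundary
theorem xor_split : ∀ (k x y a b : Nat), a < 2 ^ k → b < 2 ^ k →
    (x * 2 ^ k + a) ^^^ (y * 2 ^ k + b) = (x ^^^ y) * 2 ^ k + (a ^^^ b) := by
  intro k
  induction k with
  | zero => intro x y a b ha hb; interval_cases a; interval_cases b; simp
  | succ k ih =>
    intro x y a b ha hb
    have hp : 2 ^ (k + 1) = 2 ^ k * 2 := by ring
    have hdx : (x * 2 ^ (k+1) + a) / 2 = x * 2 ^ k + a / 2 := by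
      rw [hp, ← Nat.mul_assoc]; omega
    have hmx : (x * 2 ^ (k+1) + a) % 2 = a % 2 := by
      rw [hp, ← Nat.mul_assoc]; omega
    have hdy : (y * 2 ^ (k+1) + b) / 2 = y * 2 ^ k + b / 2 := by
      rw [hp, ← Nat.mul_assoc]; omega
    have hmy : (y * 2 ^ (k+1) + b) % 2 = b % 2 := by
      rw [hp, ← Nat.mul_assoc]; omega
    have key : ∀ (u v : Nat), u ^^^ v = 2 * (u / 2 ^^^ v / 2) + (u + v) % 2 := by
      intro u v
      have h1 : (u ^^^ v) / 2 = u / 2 ^^^ v / 2 := Nat.xor_div_two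
      have h2 : (u ^^^ v) % 2 = (u + v) % 2 := Nat.xor_mod_two_eq
      omega
    rw [key (x * 2 ^ (k+1) + a) (y * 2 ^ (k+1) + b), hdx, hdy,
        ih x y (a / 2) (b / 2) (by omega) (by omega),
        key a b]
    have hm : (x * 2 ^ (k+1) + a + (y * 2 ^ (k+1) + b)) % 2 = (a + b) % 2 := by
      rw [hp, ← Nat.mul_assoc, ← Nat.mul_assoc]; omega
    rw [hm]
    ring

theorem pow256 (k : Nat) : (256 : Nat) ^ k = 2 ^ (8 * k) := by
  rw [show (256 : Nat) = 2 ^ 8 from rfl, ← pow_mul]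

theorem pow16 (k : Nat) : (16 : Nat) ^ (2 * k) = 2 ^ (8 * k) := by
  rw [show (16 : Nat) = 2 ^ 4 from rfl, ← pow_mul]
  ring_nf

-- the big zero-padded hex numeral is the concatenation of the per-byte hex pairs
theorem mainL : ∀ (l1 l2 : List Int), l1.length = l2.length →
    (∀ e ∈ l1, 0 ≤ e ∧ e < 256) → (∀ e ∈ l2, 0 ≤ e ∧ e < 256) →
    (digitsLE 16 (2 * l1.length) (fromBytesBE l1 ^^^ fromBytesBE l2)).reverse
      = (l1.zip l2).flatMap (fun p => hex2 (p.1.toNat ^^^ p.2.toNat)) := by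
  intro l1
  induction l1 with
  | nil => intro l2 h _ _; simp [List.length_eq_zero_iff.mp h.symm, fromBytesBE, digitsLE]
  | cons x l1 ih =>
    intro l2 hlen h1 h2
    cases l2 with
    | nil => simp at hlen
    | cons y l2 =>
      have hlen' : l1.length = l2.length := by simpa using hlen
      have hx := h1 x (by simp)
      have hy := h2 y (by simp)
      have h1' : ∀ e ∈ l1, 0 ≤ e ∧ e < 256 := fun e he => h1 e (by simp [he])
      have h2' : ∀ e ∈ l2, 0 ≤ e ∧ e < 256 := fun e he => h2 e (by simp [he])
      have ha : fromBytesBE l1 < 2 ^ (8 * l1.length) := by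
        rw [← pow256]; exact fromBytesBE_lt l1 (fun e he => (h1' e he).2)
      have hb : fromBytesBE l2 < 2 ^ (8 * l1.length) := by
        rw [← pow256, hlen']; exact fromBytesBE_lt l2 (fun e he => (h2' e he).2)
      have hcx : fromBytesBE (x :: l1) = x.toNat * 2 ^ (8 * l1.length) + fromBytesBE l1 := by
        unfold fromBytesBE
        show l1.foldl _ (0 * 256 + x.toNat) = _
        rw [show (0 * 256 + x.toNat) = x.toNat from by omega, foldBE_shift, pow256]
        rfl
      have hcy : fromBytesBE (y :: l2) = y.toNat * 2 ^ (8 * l1.length) + fromBytesBE l2 := by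
        unfold fromBytesBE
        show l2.foldl _ (0 * 256 + y.toNat) = _
        rw [show (0 * 256 + y.toNat) = y.toNat from by omega, foldBE_shift, pow256, hlen']
        rfl
      have hxorlt : fromBytesBE l1 ^^^ fromBytesBE l2 < 16 ^ (2 * l1.length) := by
        rw [pow16]; exact Nat.xor_lt_two_pow ha hb
      rw [hcx, hcy, xor_split _ _ _ _ _ ha hb]
      have hw : 2 * (x :: l1).length = 2 * l1.length + 2 := by simp; ring
      rw [hw, ← pow16,
          digits_split 2 (x.toNat ^^^ y.toNat) (2 * l1.length) _ (by rw [pow16]; exact Nat.xor_lt_two_pow ha hb),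
          List.reverse_append, ih l2 hlen' h1' h2']
      simp [hex2]

theorem zip_take_eq : ∀ (l1 l2 : List Int),
    l1.zip l2 = (l1.take (min l1.length l2.length)).zip (l2.take (min l1.length l2.length)) := by
  intro l1
  induction l1 with
  | nil => intro l2; simp
  | cons x l1 ih =>
    intro l2
    cases l2 with
    | nil => simp
    | cons y l2 =>
      simp only [List.zip_cons_cons, List.length_cons]
      rw [show min (l1.length + 1) (l2.length + 1) = min l1.length l2.length + 1 from by omega]
      simp only [List.take_succ_cons, List.zip_cons_cons]
      rw [← ih l2]

-- ===== VERDICT (by name: the statement is the Claim_ definition above) =====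
theorem xor_data_spec : Claim_equal_xor_data := by
  intro xor1 xor2 _hdom hpre
  obtain ⟨h1, h2⟩ := hpre
  unfold Spec_xor_data xor_data xor_data_alt
  simp only []
  set n := min xor1.length xor2.length with hn
  by_cases h0 : n = 0
  · have hz : xor1.zip xor2 = [] := by
      rcases Nat.min_eq_zero_iff.mp (hn ▸ h0) with h | h
      · simp [List.length_eq_zero_iff.mp h]
      · simp [List.length_eq_zero_iff.mp h]
    rw [if_pos h0]
    simp [List.zip_map, hz]
    rfl
  · rw [if_neg h0]
    have hlt1 : n ≤ xor1.length := Nat.min_le_left _ _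
    have hlt2 : n ≤ xor2.length := Nat.min_le_right _ _
    have hlen1 : (xor1.take n).length = n := by simp [hlt1]
    have hlen2 : (xor2.take n).length = n := by simp [hlt2]
    have hmem1 : ∀ e ∈ xor1.take n, 0 ≤ e ∧ e < 256 := fun e he => h1 e (hn ▸ he)
    have hmem2 : ∀ e ∈ xor2.take n, 0 ≤ e ∧ e < 256 := fun e he => h2 e (hn ▸ he)
    have hmain := mainL (xor1.take n) (xor2.take n) (by rw [hlen1, hlen2]) hmem1 hmem2
    rw [hlen1] at hmain
    apply congrArg String.mk
    rw [List.zip_map, List.foldl_map, zip_take_eq xor1 xor2, ← hn]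
    rw [PySem.List.foldl_congr_mem _ _
        (fun acc (p : Int × Int) => acc ++ hex2 (p.1.toNat ^^^ p.2.toNat)) _ ?_]
    · rw [PySem.List.foldl_append_eq_flatMap, List.nil_append, ← hmain]
    · intro acc p hp
      obtain ⟨hpa, hpb⟩ := List.of_mem_zip hp
      have ha := hmem1 _ hpa
      have hb := hmem2 _ hpb
      simp only [Prod.map]
      exact congrArg (fun v => acc ++ hex2 v) (pairA p.1 p.2 ha.1 ha.2 hb.1 hb.2)
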